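-- pv_equiv track=rewrite | github.com/mrjones2014/CS360-shors-algorithm | ExperimentUtils.py | build_backend_dict
-- ===== SOURCE A (Python) =====
-- def build_backend_dict(backends):
--     dict = {1: "local_qasm_simulator"}
--     i = 2
--     # ensure simulators are at top of list
--     for b in backends:
--         if "simulator" in b["name"]:
--             dict[i] = b["name"]
--             i += 1
--     for b in backends:
--         if "simulator" not in b["name"]:
--             dict[i] = b["name"]
--             i += 1
--     return dict
-- ===== SOURCE B (Python) =====
-- def build_backend_dict(backends):
--     sims, others = [], []
--     for b in backends:
--         (sims if "simulator" in b["name"] else others).append(b["name"])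
--     result = {1: "local_qasm_simulator"}
--     for i, name in enumerate(sims + others, start=2):
--         result[i] = name
--     return result
-- ===== Notes on version B (the rewrite author's own statement) =====
-- stated objective: simpler
-- what changed: One partition pass collects simulator and non-simulator names, then a single enumerate(..., start=2) pass over the concatenation assigns indices, replacing A's two filtered scans that each thread a manual counter through dict inserts.
import Mathlib
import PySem

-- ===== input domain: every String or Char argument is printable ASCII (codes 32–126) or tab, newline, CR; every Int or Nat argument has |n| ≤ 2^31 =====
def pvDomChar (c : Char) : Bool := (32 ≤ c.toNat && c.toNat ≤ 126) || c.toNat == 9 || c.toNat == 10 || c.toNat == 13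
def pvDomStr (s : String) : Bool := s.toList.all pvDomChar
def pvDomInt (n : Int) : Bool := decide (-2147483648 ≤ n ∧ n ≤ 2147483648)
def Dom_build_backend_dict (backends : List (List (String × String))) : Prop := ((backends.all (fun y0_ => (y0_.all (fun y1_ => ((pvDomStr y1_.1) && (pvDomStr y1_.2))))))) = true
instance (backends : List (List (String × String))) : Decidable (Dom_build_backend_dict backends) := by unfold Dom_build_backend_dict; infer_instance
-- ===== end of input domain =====

-- B replaces A's two filtered counter-threading scans by one partition pass plus one enumerate pass (objective: simpler).


-- ===== PORT A =====
-- b["name"]: first-match lookup; the `none` branch (Python KeyError) is excluded by Pre_ and leaves the state unchanged.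
def pvName? (b : List (String × String)) : Option String := (PySem.Dict.mk b).get? "name"

def build_backend_dict (backends : List (List (String × String))) : List (Int × String) :=
  let st0 : PySem.Dict Int String × Int := (PySem.Dict.ofList [((1 : Int), "local_qasm_simulator")], 2)
  let st1 := backends.foldl (fun st b =>
    match pvName? b with
    | some n => if PySem.Str.isIn "simulator" n then (st.1.insert st.2 n, st.2 + 1) else st
    | none => st) st0
  let st2 := backends.foldl (fun st b =>
    match pvName? b with
    | some n => if PySem.Str.isIn "simulator" n then st else (st.1.insert st.2 n, st.2 + 1)
    | none => st) st1
  st2.1.items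

-- ===== PORT B =====
def build_backend_dict_alt (backends : List (List (String × String))) : List (Int × String) :=
  let parts := backends.foldl (fun (p : List String × List String) b =>
    match pvName? b with
    | some n => if PySem.Str.isIn "simulator" n then (p.1 ++ [n], p.2) else (p.1, p.2 ++ [n])
    | none => p) ([], [])
  ((1 : Int), "local_qasm_simulator") :: PySem.List.enumerate (parts.1 ++ parts.2) 2

-- ===== PRECONDITION & SPEC =====
-- Pre_ excludes exactly the inputs where Python A raises KeyError: a backend dict lacking the "name" key.
def Pre_build_backend_dict (backends : List (List (String × String))) : Prop :=
  ∀ b ∈ backends, "name" ∈ b.map Prod.fst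
instance (backends : List (List (String × String))) : Decidable (Pre_build_backend_dict backends) := by unfold Pre_build_backend_dict; infer_instance

def pvWitness_build_backend_dict : (List (List (String × String))) :=
  [[("name", "ibmq_qasm_simulator")], [("name", "ibmqx5")]]

def Spec_build_backend_dict (backends : List (List (String × String))) (out : List (Int × String)) : Prop := out = build_backend_dict_alt backends
instance (backends : List (List (String × String))) (out : List (Int × String)) : Decidable (Spec_build_backend_dict backends out) := by unfold Spec_build_backend_dict; infer_instance

-- ===== CLAIM (what is proved, stated in full; the proofs are below) =====
def Claim_equal_build_backend_dict : Prop := ∀ (backends : List (List (String × String))), Dom_build_backend_dict backends → Pre_build_backend_dict backends → Spec_build_backend_dict backends (build_backend_dict backends)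

-- ===== LEMMAS AND PROOFS =====

-- the names a pass with keep-condition (isIn = p) selects, in order
def pvSel (p : Bool) (backends : List (List (String × String))) : List String :=
  backends.foldr (fun b acc =>
    match pvName? b with
    | some n => if PySem.Str.isIn "simulator" n = p then n :: acc else acc
    | none => acc) []

theorem pvSel_nil (p : Bool) : pvSel p [] = [] := rfl

theorem pvSel_cons (p : Bool) (b : List (String × String)) (bs : List (List (String × String))) :
    pvSel p (b :: bs) =
      (match pvName? b with
       | some n => if PySem.Str.isIn "simulator" n = p then n :: pvSel p bs else pvSel p bs
       | none => pvSel p bs) := by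
  unfold pvSel
  simp [List.foldr]

-- A's first pass, starting from (d, i) with all keys of d below i,
-- appends enumerate (pvSel true bs) i to the dict and advances i by its length.
theorem pvA_fold1 (bs : List (List (String × String))) :
    ∀ (d : PySem.Dict Int String) (i : Int),
      (∀ k ∈ d.keys, k < i) →
      (bs.foldl (fun st b =>
          match pvName? b with
          | some n => if PySem.Str.isIn "simulator" n then (st.1.insert st.2 n, st.2 + 1) else st
          | none => st) (d, i))
        = (PySem.Dict.mk (d.items ++ PySem.List.enumerate (pvSel true bs) i),
           i + (pvSel true bs).length) := by
  induction bs with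
  | nil =>
    intro d i _
    simp [pvSel_nil, PySem.List.enumerate_nil]
  | cons b bs ih =>
    intro d i hk
    rw [List.foldl_cons, pvSel_cons]
    cases hn : pvName? b with
    | none => exact ih d i hk
    | some n =>
      simp only [hn]
      cases hp : PySem.Str.isIn "simulator" n with
      | true =>
        rw [if_pos rfl, if_pos rfl]
        have hfresh : d.contains i = false := by
          rw [PySem.Dict.contains_eq_decide_mem_keys]
          simp only [decide_eq_false_iff_not]
          intro hmem
          exact lt_irrefl i (hk i hmem)
        have hitems : (d.insert i n).items = d.items ++ [(i, n)] := by
          rw [PySem.Dict.items_insert, hfresh]; simp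
        have hk' : ∀ k ∈ (d.insert i n).keys, k < i + 1 := by
          intro k hkmem
          rcases (PySem.Dict.mem_keys_insert _ _ _ _).1 hkmem with h | h
          · omega
          · have := hk k h; omega
        rw [ih (d.insert i n) (i + 1) hk', PySem.List.enumerate_cons, hitems]
        rw [Prod.mk.injEq]
        refine ⟨by simp [List.append_assoc], by push_cast [List.length_cons]; omega⟩
      | false =>
        rw [if_neg (by decide), if_neg (by decide)]
        exact ih d i hk

-- same, for A's second pass (isIn in the guard, insert in the else branch)
theorem pvA_fold2 (bs : List (List (String × String))) :
    ∀ (d : PySem.Dict Int String) (i : Int),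
      (∀ k ∈ d.keys, k < i) →
      (bs.foldl (fun st b =>
          match pvName? b with
          | some n => if PySem.Str.isIn "simulator" n then st else (st.1.insert st.2 n, st.2 + 1)
          | none => st) (d, i))
        = (PySem.Dict.mk (d.items ++ PySem.List.enumerate (pvSel false bs) i),
           i + (pvSel false bs).length) := by
  induction bs with
  | nil =>
    intro d i _
    simp [pvSel_nil, PySem.List.enumerate_nil]
  | cons b bs ih =>
    intro d i hk
    rw [List.foldl_cons, pvSel_cons]
    cases hn : pvName? b with
    | none => exact ih d i hk
    | some n =>
      simp only [hn]
      cases hp : PySem.Str.isIn "simulator" n with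
      | true =>
        rw [if_pos rfl, if_neg (by decide)]
        exact ih d i hk
      | false =>
        rw [if_neg (by decide), if_pos rfl]
        have hfresh : d.contains i = false := by
          rw [PySem.Dict.contains_eq_decide_mem_keys]
          simp only [decide_eq_false_iff_not]
          intro hmem
          exact lt_irrefl i (hk i hmem)
        have hitems : (d.insert i n).items = d.items ++ [(i, n)] := by
          rw [PySem.Dict.items_insert, hfresh]; simp
        have hk' : ∀ k ∈ (d.insert i n).keys, k < i + 1 := by
          intro k hkmem
          rcases (PySem.Dict.mem_keys_insert _ _ _ _).1 hkmem with h | h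
          · omega
          · have := hk k h; omega
        rw [ih (d.insert i n) (i + 1) hk', PySem.List.enumerate_cons, hitems]
        rw [Prod.mk.injEq]
        refine ⟨by simp [List.append_assoc], by push_cast [List.length_cons]; omega⟩

-- B's partition fold, with accumulators generalized.
theorem pvB_fold (bs : List (List (String × String))) :
    ∀ (s o : List String),
      (bs.foldl (fun (p : List String × List String) b =>
          match pvName? b with
          | some n => if PySem.Str.isIn "simulator" n then (p.1 ++ [n], p.2) else (p.1, p.2 ++ [n])
          | none => p) (s, o))
        = (s ++ pvSel true bs, o ++ pvSel false bs) := by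
  induction bs with
  | nil => intro s o; simp [pvSel_nil]
  | cons b bs ih =>
    intro s o
    rw [List.foldl_cons]
    cases hn : pvName? b with
    | none =>
      simp only [hn]
      rw [ih s o, pvSel_cons, pvSel_cons, hn]
    | some n =>
      simp only [hn]
      cases hp : PySem.Str.isIn "simulator" n with
      | true =>
        rw [if_pos rfl, ih (s ++ [n]) o]
        simp only [pvSel_cons, hn]
        rw [if_pos hp, if_neg (by simp only [hp]; decide)]
        simp [List.append_assoc]
      | false =>
        rw [if_neg (by decide), ih s (o ++ [n])]
        simp only [pvSel_cons, hn]
        rw [if_neg (by simp only [hp]; decide), if_pos hp]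
        simp [List.append_assoc]

-- ===== VERDICT (by name: the statement is the Claim_ definition above) =====
theorem build_backend_dict_spec : Claim_equal_build_backend_dict := by
  intro backends _ _
  unfold Spec_build_backend_dict build_backend_dict build_backend_dict_alt
  have hd0 : (PySem.Dict.ofList [((1 : Int), "local_qasm_simulator")]).items
      = [((1 : Int), "local_qasm_simulator")] := rfl
  have h1 := pvA_fold1 backends (PySem.Dict.ofList [((1 : Int), "local_qasm_simulator")]) 2
    (by decide)
  rw [hd0] at h1
  have hkbd : ∀ k ∈ (PySem.Dict.mk ([((1 : Int), "local_qasm_simulator")]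
      ++ PySem.List.enumerate (pvSel true backends) 2)).keys,
      k < 2 + ((pvSel true backends).length : Int) := by
    intro k hk
    simp only [PySem.Dict.keys_mk, List.map_append, List.map_cons, List.map_nil,
      List.mem_append, List.mem_cons, List.not_mem_nil, or_false, List.mem_map] at hk
    rcases hk with rfl | ⟨q, hq, rfl⟩
    · omega
    · rcases (PySem.List.mem_enumerate_iff _ _ _).1 hq with ⟨j, hj, rfl⟩
      show (2 + (j : Int)) < 2 + ((pvSel true backends).length : Int)
      omega
  have h2 := pvA_fold2 backends
    (PySem.Dict.mk ([((1 : Int), "local_qasm_simulator")]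
      ++ PySem.List.enumerate (pvSel true backends) 2))
    (2 + ((pvSel true backends).length : Int)) hkbd
  simp only [h1, h2, pvB_fold backends [] []]
  simp [PySem.List.enumerate_append]
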